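-- pv_equiv track=rewrite | github.com/benrich37/perlStuff | helpers/generic_helpers.py | add_sp_cmds
-- ===== SOURCE A (Python) =====
-- def append_key_val_to_cmds_list(cmds, key, val, allow_duplicates = False, append_duplicates = False):
--     keys = [cmd[0] for cmd in cmds]
--     if not key in keys:
--         cmds.append((key, val))
--     elif allow_duplicates:
--         if append_duplicates:
--             cmds[keys.index(key)][1] += f" {val}"
--         else:
--             cmds.append((key, val))
--     else:
--         cmds[keys.index(key)] = (key, val)
--     return cmds
--
-- def add_sp_cmds(cmds, ortho=True):
--     dump_pairs = [
--         ["dump", "End BandEigs"],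
--         ["dump", "End ElecDensity"],
--         ["dump", "End EigStats"],
--         ["dump", "End BandProjections"],
--         ["dump", "End Fillings"],
--         ["dump", "End Kpoints"],
--     ]
--     rest_pairs = [
--         ["band-projection-params"]
--     ]
--     if ortho:
--         rest_pairs[0].append("yes no")
--     else:
--         rest_pairs[0].append("no no")
--     for dp in dump_pairs:
--         key = dp[0]
--         val = dp[1]
--         cmds = append_key_val_to_cmds_list(cmds, key, val, allow_duplicates=True)
--     for rp in rest_pairs:
--         key = rp[0]
--         val = rp[1]
--         cmds = append_key_val_to_cmds_list(cmds, key, val, allow_duplicates=False)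
--     return cmds
-- ===== SOURCE B (Python) =====
-- _DUMPS = [("dump", v) for v in (
--     "End BandEigs", "End ElecDensity", "End EigStats",
--     "End BandProjections", "End Fillings", "End Kpoints")]
--
-- def add_sp_cmds(cmds, ortho=True):
--     # Builds a fresh list in one streaming pass (does not mutate cmds):
--     # the dump pairs never carry the bp key, so the replace-or-append of
--     # band-projection-params always targets the original prefix.
--     bp = ("band-projection-params", "yes no" if ortho else "no no")
--     out = []
--     it = iter(cmds)
--     for c in it:
--         if c[0] == bp[0]:
--             out.append(bp)
--             out.extend(it)
--             out.extend(_DUMPS)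
--             return out
--         out.append(c)
--     out.extend(_DUMPS)
--     out.append(bp)
--     return out
-- ===== Notes on version B (the rewrite author's own statement) =====
-- stated objective: alternative
-- what changed: Replaces A's staged in-place passes (helper-driven membership test + keys.index per pair, dumps first then bp replacement) with a single streaming pass that builds a fresh output list: on the first band-projection-params entry it emits the replacement, flushes the remaining input and the dump pairs and returns early; otherwise it appends the dumps and then the bp pair.
import Mathlib
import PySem

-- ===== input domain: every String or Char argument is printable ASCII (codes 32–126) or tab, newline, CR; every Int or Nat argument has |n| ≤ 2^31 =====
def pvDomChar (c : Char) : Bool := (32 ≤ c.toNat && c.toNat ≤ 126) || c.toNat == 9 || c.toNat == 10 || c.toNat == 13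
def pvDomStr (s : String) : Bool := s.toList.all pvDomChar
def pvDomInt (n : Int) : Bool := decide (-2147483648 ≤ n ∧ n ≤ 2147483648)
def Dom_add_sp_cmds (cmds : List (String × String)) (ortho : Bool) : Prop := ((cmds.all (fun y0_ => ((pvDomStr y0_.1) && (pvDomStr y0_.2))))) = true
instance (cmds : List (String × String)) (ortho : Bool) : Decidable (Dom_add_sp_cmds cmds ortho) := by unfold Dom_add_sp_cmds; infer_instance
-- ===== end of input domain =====

-- B builds a fresh list in ONE streaming pass (replace bp at first match, early return,
-- dumps flushed at the end) instead of A's staged helper-driven in-place passes.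
-- Python A mutates `cmds` in place and returns it; B returns a fresh list: the
-- equivalence proved here is about the RETURN value only.

-- ===== PORT A =====
-- literal port of append_key_val_to_cmds_list; the append_duplicates branch (dead in
-- add_sp_cmds, which never passes append_duplicates=True) ports `cmds[i][1] += f" {val}"`
def append_key_val_to_cmds_list (cmds : List (String × String)) (key val : String)
    (allow_duplicates append_duplicates : Bool) : List (String × String) :=
  let keys := cmds.map Prod.fst
  if ¬ (key ∈ keys) then cmds ++ [(key, val)]
  else if allow_duplicates then
    if append_duplicates then
      match PySem.List.index? keys key with
      | some i => cmds.modify i (fun p => (p.1, p.2 ++ " " ++ val))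
      | none => cmds
    else cmds ++ [(key, val)]
  else
    match PySem.List.index? keys key with
    | some i => cmds.set i (key, val)
    | none => cmds

def add_sp_cmds (cmds : List (String × String)) (ortho : Bool) : List (String × String) :=
  let dump_pairs : List (String × String) :=
    [("dump", "End BandEigs"), ("dump", "End ElecDensity"), ("dump", "End EigStats"),
     ("dump", "End BandProjections"), ("dump", "End Fillings"), ("dump", "End Kpoints")]
  let rest_pairs : List (String × String) :=
    [("band-projection-params", if ortho then "yes no" else "no no")]
  let cmds := dump_pairs.foldl
    (fun c dp => append_key_val_to_cmds_list c dp.1 dp.2 true false) cmds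
  rest_pairs.foldl
    (fun c rp => append_key_val_to_cmds_list c rp.1 rp.2 false false) cmds

-- ===== PORT B =====
def pvDumps : List (String × String) :=
  [("dump", "End BandEigs"), ("dump", "End ElecDensity"), ("dump", "End EigStats"),
   ("dump", "End BandProjections"), ("dump", "End Fillings"), ("dump", "End Kpoints")]

-- Source B's streaming loop with early return: `out` is the accumulated prefix
def pvStream (bp : String × String) : List (String × String) → List (String × String)
  | [] => pvDumps ++ [bp]
  | c :: rest => if c.1 == bp.1 then bp :: (rest ++ pvDumps) else c :: pvStream bp rest

def add_sp_cmds_alt (cmds : List (String × String)) (ortho : Bool) : List (String × String) :=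
  pvStream ("band-projection-params", if ortho then "yes no" else "no no") cmds

-- ===== PRECONDITION & SPEC =====
def Spec_add_sp_cmds (cmds : List (String × String)) (ortho : Bool) (out : List (String × String)) : Prop := out = add_sp_cmds_alt cmds ortho
instance (cmds : List (String × String)) (ortho : Bool) (out : List (String × String)) : Decidable (Spec_add_sp_cmds cmds ortho out) := by unfold Spec_add_sp_cmds; infer_instance

-- ===== CLAIM (what is proved, stated in full; the proofs are below) =====
def Claim_equal_add_sp_cmds : Prop := ∀ (cmds : List (String × String)) (ortho : Bool), Dom_add_sp_cmds cmds ortho → Spec_add_sp_cmds cmds ortho (add_sp_cmds cmds ortho)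

-- ===== LEMMAS AND PROOFS =====

-- first-match replace-or-append, used to characterise A's allow_duplicates=False helper
def replFirst (bp : String × String) : List (String × String) → List (String × String)
  | [] => [bp]
  | c :: rest => if c.1 == bp.1 then bp :: rest else c :: replFirst bp rest

-- with allow_duplicates=True, append_duplicates=False every pair is just appended
theorem akv_dup (c : List (String × String)) (k v : String) :
    append_key_val_to_cmds_list c k v true false = c ++ [(k, v)] := by
  unfold append_key_val_to_cmds_list
  by_cases h : k ∈ c.map Prod.fst <;> simp [h]

-- with allow_duplicates=False the helper is exactly first-match replace-or-append
theorem akv_replace (c : List (String × String)) (k v : String) :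
    append_key_val_to_cmds_list c k v false false = replFirst (k, v) c := by
  induction c with
  | nil => simp [append_key_val_to_cmds_list, replFirst]
  | cons a t ih =>
    unfold append_key_val_to_cmds_list at ih ⊢
    by_cases hk : a.1 = k
    · simp [replFirst, hk, List.idxOf?_cons]
    · by_cases hm : k ∈ t.map Prod.fst
      · simp only [PySem.List.index?_eq_idxOf?] at ih
        simp [replFirst, hk, hm, Ne.symm hk, List.idxOf?_cons] at ih ⊢
        cases h : List.idxOf? k (t.map Prod.fst) with
        | none => rw [List.idxOf?_eq_none_iff] at h; exact absurd hm h
        | some i => rw [h] at ih; simpa [h] using ih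
      · simp [replFirst, hk, hm, Ne.symm hk] at ih ⊢
        exact ih

-- B's one-pass stream equals replace-or-append applied to cmds ++ dumps, for the
-- concrete bp key, which no dump pair carries
theorem stream_eq_repl (v : String) (cmds : List (String × String)) :
    pvStream ("band-projection-params", v) cmds
      = replFirst ("band-projection-params", v) (cmds ++ pvDumps) := by
  induction cmds with
  | nil => simp [pvStream, pvDumps, replFirst]
  | cons c rest ih =>
    by_cases h : c.1 = "band-projection-params"
    · simp [pvStream, replFirst, h]
    · simp [pvStream, replFirst, h, ih]

-- ===== VERDICT (by name: the statement is the Claim_ definition above) =====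
theorem add_sp_cmds_spec : Claim_equal_add_sp_cmds := by
  intro cmds ortho _
  unfold Spec_add_sp_cmds add_sp_cmds add_sp_cmds_alt
  simp only [List.foldl, akv_dup, akv_replace]
  rw [stream_eq_repl]
  simp [pvDumps]
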